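-- pv_equiv track=rewrite | github.com/fBaz92/Algoritmi_2021 | 20210313_piastrellature.py | piastrellature
-- ===== SOURCE A (Python) =====
-- def piastrellature(n):
--     """
--
--
--     Parameters
--     ----------
--     n : int
--         lunghezza del bagno.
--
--     Returns
--     -------
--         Questa funzione ricorsiva ritorna
--         il numero di piastrellature possibili
--         di un bagno 1xn con piastrelle 1x1 e
--         1x2.
--         Soluzione puramente ricorsiva
--
--     """
--     #check di sicurezza su cosa do dentro alla funzione
--     assert type(n) == int
--     assert n>0
--
--     if n == 1:
--         return 1
--     elif n == 2:
--         return 2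
--     else:
--         return piastrellature(n-1) + piastrellature(n-2)
-- ===== SOURCE B (Python) =====
-- def piastrellature(n):
--     assert type(n) == int
--     assert n > 0
--     a, b = 1, 1
--     for _ in range(n):
--         a, b = b, a + b
--     return a
-- ===== Notes on version B (the rewrite author's own statement) =====
-- stated objective: faster
-- what changed: Replaces the naive double recursion with an iterative two-variable Fibonacci loop.
import Mathlib
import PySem

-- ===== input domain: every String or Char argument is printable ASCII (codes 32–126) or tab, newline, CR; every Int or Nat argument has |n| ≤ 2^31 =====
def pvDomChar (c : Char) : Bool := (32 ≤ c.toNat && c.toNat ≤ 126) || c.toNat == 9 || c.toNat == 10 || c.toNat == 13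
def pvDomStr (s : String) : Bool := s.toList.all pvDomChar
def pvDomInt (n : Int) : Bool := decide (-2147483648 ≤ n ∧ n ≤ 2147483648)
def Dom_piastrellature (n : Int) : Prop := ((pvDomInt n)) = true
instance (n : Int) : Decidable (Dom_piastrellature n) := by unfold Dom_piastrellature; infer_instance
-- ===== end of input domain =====

-- B replaces A's exponential double recursion with an iterative two-variable Fibonacci loop (O(n)).


-- ===== PORT A =====
-- Python A: assert n > 0 (raises on n ≤ 0, excluded by Pre_); then the pure double recursion.
-- The 'n ≤ 0 → 0' guard only makes the recursion total; Pre_ excludes those inputs.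
def piastrellature (n : Int) : Int :=
  if n ≤ 0 then 0
  else if n = 1 then 1
  else if n = 2 then 2
  else piastrellature (n - 1) + piastrellature (n - 2)
termination_by n.toNat
decreasing_by all_goals omega

-- ===== PORT B =====
-- B: a, b = 1, 1; for _ in range(n): a, b = b, a + b; return a
def piastrellature_alt (n : Int) : Int :=
  ((List.range n.toNat).foldl (fun (p : Int × Int) _ => (p.2, p.1 + p.2)) (1, 1)).1

-- ===== PRECONDITION & SPEC =====
-- Python A asserts n > 0: it raises AssertionError on n ≤ 0 (and the ports' values there are junk).
def Pre_piastrellature (n : Int) : Prop := 1 ≤ n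
instance (n : Int) : Decidable (Pre_piastrellature n) := by unfold Pre_piastrellature; infer_instance
def pvWitness_piastrellature : Int := (5)

def Spec_piastrellature (n : Int) (out : Int) : Prop := out = piastrellature_alt n
instance (n : Int) (out : Int) : Decidable (Spec_piastrellature n out) := by unfold Spec_piastrellature; infer_instance

-- ===== CLAIM (what is proved, stated in full; the proofs are below) =====
def Claim_equal_piastrellature : Prop := ∀ (n : Int), Dom_piastrellature n → Pre_piastrellature n → Spec_piastrellature n (piastrellature n)

-- ===== LEMMAS AND PROOFS =====

-- reference sequence: g 0 = 1, g 1 = 1, g (k+2) = g k + g (k+1)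
def pvG : Nat → Int
  | 0 => 1
  | 1 => 1
  | (k + 2) => pvG k + pvG (k + 1)

lemma pvFoldl_range (k : Nat) :
    (List.range k).foldl (fun (p : Int × Int) _ => (p.2, p.1 + p.2)) (1, 1) = (pvG k, pvG (k + 1)) := by
  induction k with
  | zero => simp [pvG]
  | succ k ih =>
      rw [List.range_succ, List.foldl_append, ih]
      simp [pvG]

lemma pvAlt_eq (k : Nat) : piastrellature_alt (k : Int) = pvG k := by
  unfold piastrellature_alt
  rw [Int.toNat_natCast, pvFoldl_range]

lemma pvA_eq (k : Nat) : piastrellature ((k : Int) + 1) = pvG (k + 1) := by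
  induction k using Nat.strong_induction_on with
  | _ k ih =>
    match k with
    | 0 => unfold piastrellature; norm_num [pvG]
    | 1 => unfold piastrellature; norm_num [pvG]
    | (m + 2) =>
      rw [piastrellature]
      push_cast
      have h1 : ¬ ((m : Int) + 2 + 1 ≤ 0) := by omega
      have h2 : ¬ ((m : Int) + 2 + 1 = 1) := by omega
      have h3 : ¬ ((m : Int) + 2 + 1 = 2) := by omega
      rw [if_neg h1, if_neg h2, if_neg h3]
      have e1 : ((m : Int) + 2 + 1) - 1 = ((m + 1 : Nat) : Int) + 1 := by push_cast; ring
      have e2 : ((m : Int) + 2 + 1) - 2 = ((m : Nat) : Int) + 1 := by omega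
      rw [e1, e2, ih (m + 1) (by omega), ih m (by omega)]
      have hgoal : pvG (m + 2 + 1) = pvG (m + 1) + pvG (m + 2) := by
        rw [show m + 2 + 1 = (m + 1) + 2 from rfl, pvG]
      rw [hgoal]
      exact add_comm _ _

-- ===== VERDICT (by name: the statement is the Claim_ definition above) =====
theorem piastrellature_spec : Claim_equal_piastrellature := by
  intro n _ hpre
  have hn : 1 ≤ n := hpre
  unfold Spec_piastrellature
  obtain ⟨k, hk⟩ : ∃ k : Nat, n = (k : Int) + 1 := by
    refine ⟨(n - 1).toNat, ?_⟩; omega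
  subst hk
  rw [pvA_eq k, show ((k : Int) + 1) = ((k + 1 : Nat) : Int) by push_cast; ring, pvAlt_eq]
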